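-- pv_equiv track=rewrite | github.com/LanZhang-UCL/dissertation | Dataset/toy2/toy2.py | genlol
-- ===== SOURCE A (Python) =====
-- def genlol(list_of_list):
--     res = []
--     if len(list_of_list) > 1:
--         for comp in list_of_list[0]:
--             temp = genlol(list_of_list[1:])
--             for i in range(0, len(temp)):
--                 res.append(comp+'+'+temp[i])
--     elif len(list_of_list) == 1:
--         for comp in list_of_list[0]:
--             res.append(comp)
--     else:
--         res = []
--     return res
-- ===== SOURCE B (Python) =====
-- def genlol(list_of_list):
--     if not list_of_list:
--         return []
--     res = list(list_of_list[0])
--     for lst in list_of_list[1:]: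
--         res = [r + '+' + x for r in res for x in lst]
--     return res
-- ===== Notes on version B (the rewrite author's own statement) =====
-- stated objective: idiomatic
-- what changed: Replaces the recursion on the tail (which re-computes genlol(tail) once per element of the head list) with a single left-to-right fold accumulating the growing joined Cartesian product.
import Mathlib
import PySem

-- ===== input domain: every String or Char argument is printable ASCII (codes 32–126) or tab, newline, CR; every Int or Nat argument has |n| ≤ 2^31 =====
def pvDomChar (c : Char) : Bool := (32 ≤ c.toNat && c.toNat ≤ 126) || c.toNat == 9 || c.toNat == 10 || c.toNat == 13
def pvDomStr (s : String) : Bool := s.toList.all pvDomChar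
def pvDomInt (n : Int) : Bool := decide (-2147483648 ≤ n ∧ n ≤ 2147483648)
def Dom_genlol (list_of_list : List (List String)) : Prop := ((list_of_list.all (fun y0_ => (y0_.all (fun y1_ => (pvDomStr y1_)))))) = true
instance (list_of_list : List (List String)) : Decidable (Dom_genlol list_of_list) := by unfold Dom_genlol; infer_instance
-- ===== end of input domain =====

-- ===== PORT A =====
-- B replaces A's tail recursion by a single left fold accumulating the joined product; return values proved equal.
def genlol (list_of_list : List (List String)) : List String :=
  match list_of_list with
  | [] => []
  | [l] => l.foldl (fun res comp => res ++ [comp]) []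
  | l :: rest =>
      l.foldl (fun res comp =>
        let temp := genlol rest
        temp.foldl (fun res t => res ++ [comp ++ "+" ++ t]) res) []

-- ===== PORT B =====
def genlol_alt (list_of_list : List (List String)) : List String :=
  match list_of_list with
  | [] => []
  | l0 :: rest =>
      rest.foldl (fun res lst => res.flatMap (fun r => lst.map (fun x => r ++ "+" ++ x))) l0

-- ===== PRECONDITION & SPEC =====
def Spec_genlol (list_of_list : List (List String)) (out : List String) : Prop := out = genlol_alt list_of_list
instance (list_of_list : List (List String)) (out : List String) : Decidable (Spec_genlol list_of_list out) := by unfold Spec_genlol; infer_instance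

-- ===== CLAIM (what is proved, stated in full; the proofs are below) =====
def Claim_equal_genlol : Prop := ∀ (list_of_list : List (List String)), Dom_genlol list_of_list → Spec_genlol list_of_list (genlol list_of_list)

-- ===== LEMMAS AND PROOFS =====

-- ===== VERDICT (by name: the statement is the Claim_ definition above) =====
-- A's foldl-append loops are flatMap/map
lemma foldl_app (l acc : List String) (f : String → String) :
    l.foldl (fun res t => res ++ [f t]) acc = acc ++ l.map f := by
  induction l generalizing acc with
  | nil => simp
  | cons a l ih => simp [ih]

lemma genlol_cons (a : List String) (rest : List (List String)) (h : rest ≠ []) :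
    genlol (a :: rest) = a.flatMap (fun comp => (genlol rest).map (fun t => comp ++ "+" ++ t)) := by
  obtain ⟨b, rs, rfl⟩ := List.exists_cons_of_ne_nil h
  show (a.foldl _ []) = _
  have : ∀ acc : List String, a.foldl (fun res comp =>
      (genlol (b :: rs)).foldl (fun res t => res ++ [comp ++ "+" ++ t]) res) acc
      = acc ++ a.flatMap (fun comp => (genlol (b :: rs)).map (fun t => comp ++ "+" ++ t)) := by
    intro acc
    induction a generalizing acc with
    | nil => simp
    | cons c cs ih =>
      rw [List.foldl_cons, foldl_app, ih, List.flatMap_cons, List.append_assoc]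
  simpa using this []

lemma genlol_single (l : List String) : genlol [l] = l := by
  show l.foldl (fun res comp => res ++ [comp]) [] = l
  simpa using foldl_app l [] id

lemma key (rest : List (List String)) (init : List String) (h : rest ≠ []) :
    rest.foldl (fun res lst => res.flatMap (fun r => lst.map (fun x => r ++ "+" ++ x))) init
      = init.flatMap (fun r => (genlol rest).map (fun t => r ++ "+" ++ t)) := by
  induction rest generalizing init with
  | nil => exact absurd rfl h
  | cons c rs ih =>
    cases rs with
    | nil => simp [genlol_single, List.foldl]
    | cons b bs =>
      rw [List.foldl_cons, ih _ (by simp), genlol_cons c (b :: bs) (by simp)]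
      simp only [List.flatMap_assoc, List.map_flatMap, List.flatMap_map, List.map_map,
        Function.comp_def]
      congr 1; funext r; congr 1; funext x; congr 1; funext t
      simp [String.append_assoc]

theorem genlol_spec : Claim_equal_genlol := by
  intro ll _
  unfold Spec_genlol
  cases ll with
  | nil => rfl
  | cons l rest =>
    cases rest with
    | nil => show genlol [l] = genlol_alt [l]; simp [genlol_single, genlol_alt]
    | cons b bs =>
      show genlol _ = (b :: bs).foldl _ l
      rw [key (b :: bs) l (by simp), genlol_cons l (b :: bs) (by simp)]
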